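-- pv_equiv track=rewrite | github.com/JVieir4/Universidade | Código/Python/2.Grafos/erdos.py | build
-- ===== SOURCE A (Python) =====
-- def build(artigos):
--     adj = {}
--     for autores in artigos.values():
--         for autor in autores:
--             for autor2 in autores:
--                 if autor != autor2:
--                     if autor not in adj:
--                         adj[autor] = set()
--                     if autor2 not in adj:
--                         adj[autor2] = set()
--                     adj[autor].add(autor2)
--                     adj[autor2].add(autor)
--     return adj
-- ===== SOURCE B (Python) =====
-- def build(artigos):
--     # phase 1: inverted index author -> the deduplicated author groups (of multi-author
--     # articles) that author belongs to
--     member = {}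
--     for autores in artigos.values():
--         uniq = list(dict.fromkeys(autores))
--         if len(uniq) > 1:
--             for a in uniq:
--                 member.setdefault(a, []).append(uniq)
--     # phase 2: each author's neighbour set is gathered in one comprehension over its groups
--     return {k: set(a for g in gs for a in g if a != k) for k, gs in member.items()}
-- ===== Notes on version B (the rewrite author's own statement) =====
-- stated objective: alternative
-- what changed: A scatters: a triple nested loop over raw author lists inserts co-author pairs one at a time, symmetrically, into a dict of sets with per-pair membership guards; B inverts the computation: one pass builds an inverted index author -> list of deduplicated multi-author groups it belongs to, and the result dict is then produced directly by a per-author gather comprehension over that author's groups.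
import Mathlib
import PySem

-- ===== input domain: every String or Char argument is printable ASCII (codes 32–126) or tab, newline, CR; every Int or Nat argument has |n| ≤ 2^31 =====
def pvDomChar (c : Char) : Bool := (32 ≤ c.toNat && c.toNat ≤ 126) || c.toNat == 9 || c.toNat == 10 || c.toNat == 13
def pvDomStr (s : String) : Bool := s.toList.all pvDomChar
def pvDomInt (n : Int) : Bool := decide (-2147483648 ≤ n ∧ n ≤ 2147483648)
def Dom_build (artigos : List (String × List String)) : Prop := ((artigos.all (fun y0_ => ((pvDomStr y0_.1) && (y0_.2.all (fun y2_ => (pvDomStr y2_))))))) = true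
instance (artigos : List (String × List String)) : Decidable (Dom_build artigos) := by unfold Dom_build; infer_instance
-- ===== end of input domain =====

set_option maxHeartbeats 1000000


-- B inverts A's pair-by-pair scatter into a two-phase gather (collect deduplicated groups,
-- then build each key's whole neighbour set in one pass over the groups); objective: alternative.

-- ===== PORT A =====
abbrev Adj := PySem.Dict String (PySem.Set String)

-- 'if autor not in adj: adj[autor] = set()'
def pyTouch (adj : Adj) (k : String) : Adj :=
  if adj.contains k then adj else adj.insert k PySem.Set.empty

-- body of the innermost loop of A
def buildPair (adj : Adj) (autor autor2 : String) : Adj :=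
  if autor ≠ autor2 then
    (((pyTouch (pyTouch adj autor) autor2).modify autor PySem.Set.empty
        (fun s => PySem.Set.add s autor2)).modify autor2 PySem.Set.empty
        (fun s => PySem.Set.add s autor))
  else adj

-- 'for autor in autores: for autor2 in autores: …'
def buildArticle (adj : Adj) (autores : List String) : Adj :=
  autores.foldl (fun adj autor =>
    autores.foldl (fun adj autor2 => buildPair adj autor autor2) adj) adj

def build (artigos : List (String × List String)) : List (String × List String) :=
  (((PySem.Dict.ofList artigos).values).foldl buildArticle PySem.Dict.empty).items

-- ===== PORT B =====
abbrev MDict := PySem.Dict String (List (List String))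

-- phase 1 body: 'uniq = list(dict.fromkeys(autores)); if len(uniq) > 1:
--   for a in uniq: member.setdefault(a, []).append(uniq)'
-- ('setdefault(a, []).append(uniq)' sets member[a] = member.get(a, []) + [uniq])
def memArticle (member : MDict) (autores : List String) : MDict :=
  let uniq := PySem.List.dedup autores
  if 1 < uniq.length then
    uniq.foldl (fun member a => member.modify a [] (fun gs => gs ++ [uniq])) member
  else member

-- 'return {k: set(a for g in gs for a in g if a != k) for k, gs in member.items()}'
def build_alt (artigos : List (String × List String)) : List (String × List String) :=
  (((PySem.Dict.ofList artigos).values).foldl memArticle PySem.Dict.empty).items.map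
    (fun p => (p.1, PySem.Set.ofList (p.2.flatMap (fun g => g.filter (fun a => a ≠ p.1)))))

-- ===== PRECONDITION & SPEC =====
def Spec_build (artigos : List (String × List String)) (out : List (String × List String)) : Prop := out = build_alt artigos
instance (artigos : List (String × List String)) (out : List (String × List String)) : Decidable (Spec_build artigos out) := by unfold Spec_build; infer_instance

-- ===== CLAIM (what is proved, stated in full; the proofs are below) =====
def Claim_equal_build : Prop := ∀ (artigos : List (String × List String)), Dom_build artigos → Spec_build artigos (build artigos)

-- ===== LEMMAS AND PROOFS =====

-- keys of the adjacency dict are pairwise distinct (invariant of A's loop)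
def KeysND (d : Adj) : Prop := d.keys.Nodup

-- authors x and y are already recorded as mutual co-authors in d
def Linked (d : Adj) (x y : String) : Prop :=
  d.contains x = true ∧ d.contains y = true ∧
  y ∈ d.getD x PySem.Set.empty ∧ x ∈ d.getD y PySem.Set.empty

-- normal form of every intermediate adjacency dict built from base d:
-- old entries with values rewritten by m, then the new keys (ks minus existing) with values g
def nf (d : Adj) (m : String → List String → List String) (ks : List String)
    (g : String → List String) : Adj :=
  PySem.Dict.mk ((d.items.map (fun p => (p.1, m p.1 p.2)))
    ++ ((ks.filter (fun u => !(d.contains u))).map (fun u => (u, g u))))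

def selQ (U Q : List String) (k : String) : List String :=
  (if k ∈ Q then U else Q).filter (fun a => a ≠ k)

-- state of A after the outer loop has handled the (distinct) authors Q, article authors U
def hqM (U Q : List String) (k : String) (v : List String) : List String :=
  if k ∈ U then PySem.Set.update v (selQ U Q k) else v
def hqForm (U Q : List String) (d : Adj) : Adj :=
  nf d (hqM U Q) U (fun u => PySem.Set.ofList (selQ U Q u))

def extra (x : String) (P : List String) (k : String) : List String :=
  if k = x then P.filter (fun a => a ≠ x) else if k ∈ P then [x] else []

-- state of A inside a non-first outer iteration (outer author x, inner prefix P)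
def kM (U Q : List String) (x : String) (P : List String) (k : String) (v : List String) : List String :=
  if k ∈ U then PySem.Set.update v (selQ U Q k ++ extra x P k) else v
def kForm (U Q : List String) (x : String) (P : List String) (d : Adj) : Adj :=
  nf d (kM U Q x P) U (fun u => PySem.Set.ofList (selQ U Q u ++ extra x P u))

-- state of A inside the FIRST outer iteration (outer author x = head of U, inner prefix P)
def k0M (x : String) (P : List String) (k : String) (v : List String) : List String :=
  if k = x then PySem.Set.update v (P.filter (fun a => a ≠ x))
  else if k ∈ P then PySem.Set.add v x else v
def k0Form (x : String) (P : List String) (d : Adj) : Adj :=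
  if P.length ≤ 1 then d else
  nf d (k0M x P) P (fun u => if u = x then PySem.Set.ofList (P.filter (fun a => a ≠ x)) else [x])

-- per-article closed form both sides reach: every key of U updated with U minus itself
def gM (U Q : List String) (k : String) (v : List String) : List String :=
  if k ∈ Q then PySem.Set.update v (U.filter (fun a => a ≠ k)) else v
def gForm (U Q : List String) (d : Adj) : Adj :=
  nf d (gM U Q) Q (fun u => PySem.Set.ofList (U.filter (fun a => a ≠ u)))

-- the neighbour list of k gathered over all groups containing it
def altNbrs (groups : List (List String)) (k : String) : List String :=
  PySem.Set.ofList ((groups.filter (fun g => g.contains k)).flatMap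
    (fun g => g.filter (fun a => a ≠ k)))

-- the gather normal form B computes directly: keys in first-occurrence order, whole
-- neighbour list per key
def gather (gs : List (List String)) : Adj :=
  PySem.Dict.mk ((PySem.List.dedup gs.flatten).map (fun k => (k, altNbrs gs k)))

-- the qualifying groups of a list of author lists
def qualGroups (values : List (List String)) : List (List String) :=
  (values.filter (fun L => decide (1 < (PySem.List.dedup L).length))).map PySem.List.dedup

-- ---- generic fold machinery ----

theorem pv_foldl_id {σ α : Type} {f : σ → α → σ} :
    ∀ (l : List α) (s : σ), (∀ a ∈ l, f s a = s) → l.foldl f s = s := by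
  intro l
  induction l with
  | nil => intro s _; rfl
  | cons a l ih =>
    intro s h
    simp only [List.foldl_cons, h a (by simp)]
    exact ih s (fun b hb => h b (by simp [hb]))

theorem pv_foldl_inv {σ α : Type} (Inv : σ → Prop) {f : σ → α → σ}
    (h : ∀ s a, Inv s → Inv (f s a)) :
    ∀ (l : List α) (s : σ), Inv s → Inv (l.foldl f s) := by
  intro l
  induction l with
  | nil => intro s hs; exact hs
  | cons a l ih => intro s hs; exact ih _ (h s a hs)

theorem pv_foldl_congr_inv {σ α : Type} (Inv : σ → Prop) {f f' : σ → α → σ}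
    (hpres : ∀ s a, Inv s → Inv (f' s a))
    (h : ∀ s a, Inv s → f s a = f' s a) :
    ∀ (l : List α) (s : σ), Inv s → l.foldl f s = l.foldl f' s := by
  intro l
  induction l with
  | nil => intro s _; rfl
  | cons a l ih =>
    intro s hs
    simp only [List.foldl_cons, h s a hs]
    exact ih _ (hpres s a hs)

theorem pv_foldl_establish {σ α : Type} (Q : α → σ → Prop) {f : σ → α → σ}
    (est : ∀ s a, Q a (f s a)) (pres : ∀ s a b, Q a s → Q a (f s b)) :
    ∀ (l : List α) (s : σ) (a : α), a ∈ l → Q a (l.foldl f s) := by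
  intro l
  induction l with
  | nil => intro s a ha; simp at ha
  | cons b l ih =>
    intro s a ha
    rcases List.mem_cons.mp ha with h | h
    · subst h
      exact pv_foldl_inv (Q a) (fun s c hq => pres s a c hq) l _ (est s a)
    · exact ih _ a h

theorem pv_foldl_add_cons :
    ∀ (l : List String) (a : String) (s : List String),
      List.foldl PySem.Set.add (a :: s) l
        = a :: List.foldl PySem.Set.add s (l.filter (fun y => y ≠ a)) := by
  intro l
  induction l with
  | nil => intro a s; rfl
  | cons y l ih =>
    intro a s
    by_cases hya : y = a
    · subst hya
      have h1 : PySem.Set.add (y :: s) y = y :: s := PySem.Set.add_of_mem (by simp)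
      have h2 : (y :: l).filter (fun z => z ≠ y) = l.filter (fun z => z ≠ y) := by simp
      rw [List.foldl_cons, h1, h2, ih]
    · have h2 : (y :: l).filter (fun z => z ≠ a) = y :: l.filter (fun z => z ≠ a) := by
        simp [hya]
      have h1 : PySem.Set.add (a :: s) y = a :: PySem.Set.add s y := by
        unfold PySem.Set.add
        rw [PySem.Set.contains_eq_decide, PySem.Set.contains_eq_decide]
        by_cases hm : y ∈ s
        · rw [if_pos (by simp [hm]), if_pos (by simp [hm])]
        · rw [if_neg (by simp [hya, hm]), if_neg (by simp [hm])]
          rfl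
      rw [List.foldl_cons, h1, h2, ih, List.foldl_cons]

theorem pv_dedup_cons (x : String) (l : List String) :
    PySem.List.dedup (x :: l) = x :: PySem.List.dedup (l.filter (fun y => y ≠ x)) := by
  unfold PySem.List.dedup
  rw [PySem.Set.ofList_eq_foldl, PySem.Set.ofList_eq_foldl, List.foldl_cons]
  have h0 : PySem.Set.add ([] : List String) x = [x] := by
    unfold PySem.Set.add; simp
  rw [h0, pv_foldl_add_cons]

theorem pv_foldl_drop_processed {σ : Type} {f : σ → String → σ}
    (Inv : σ → Prop) (P : String → σ → Prop) (x : String)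
    (hInv : ∀ s z, Inv s → Inv (f s z))
    (pres : ∀ s z, P x s → P x (f s z))
    (triv : ∀ s, Inv s → P x s → f s x = s) :
    ∀ (l : List String) (s : σ), Inv s → P x s →
      l.foldl f s = (l.filter (fun y => y ≠ x)).foldl f s := by
  intro l
  induction l with
  | nil => intro s _ _; rfl
  | cons y l ih =>
    intro s hs hp
    by_cases hyx : y = x
    · subst hyx
      have h2 : (y :: l).filter (fun z => z ≠ y) = l.filter (fun z => z ≠ y) := by simp
      rw [h2, List.foldl_cons, triv s hs hp]
      exact ih s hs hp
    · have h2 : (y :: l).filter (fun z => z ≠ x) = y :: l.filter (fun z => z ≠ x) := by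
        simp [hyx]
      rw [h2, List.foldl_cons, List.foldl_cons]
      exact ih (f s y) (hInv s y hs) (pres s y hp)

theorem pv_foldl_dedup {σ : Type} {f : σ → String → σ}
    (Inv : σ → Prop) (P : String → σ → Prop)
    (hInv : ∀ s x, Inv s → Inv (f s x))
    (est : ∀ s x, Inv s → P x (f s x))
    (pres : ∀ s x z, P x s → P x (f s z))
    (triv : ∀ s x, Inv s → P x s → f s x = s) :
    ∀ (l : List String) (s : σ), Inv s → l.foldl f s = (PySem.List.dedup l).foldl f s := by
  suffices H : ∀ (n : ℕ) (l : List String), l.length ≤ n → ∀ (s : σ), Inv s →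
      l.foldl f s = (PySem.List.dedup l).foldl f s by
    intro l s hs; exact H l.length l le_rfl s hs
  intro n
  induction n with
  | zero =>
    intro l hl s _
    have : l = [] := List.eq_nil_of_length_eq_zero (Nat.le_zero.mp hl)
    subst this; rfl
  | succ n ih =>
    intro l hl s hs
    cases l with
    | nil => rfl
    | cons x l' =>
      rw [pv_dedup_cons, List.foldl_cons, List.foldl_cons]
      have h1 : l'.foldl f (f s x) = (l'.filter (fun y => y ≠ x)).foldl f (f s x) :=
        pv_foldl_drop_processed Inv P x hInv (fun s' z hp => pres s' x z hp)
          (fun s' hi hp => triv s' x hi hp) l' (f s x) (hInv s x hs) (est s x hs)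
      rw [h1]
      exact ih (l'.filter (fun y => y ≠ x))
        (le_trans (List.length_filter_le _ _) (by simpa using Nat.lt_succ_iff.mp (by simpa using hl)))
        (f s x) (hInv s x hs)

-- ---- dict primitive facts ----

theorem pv_not_contains_ne {d : Adj} {k : String} (hc : d.contains k = false) :
    ∀ p ∈ d.items, p.1 ≠ k := by
  intro p hp h
  have hk : k ∈ d.keys := by
    unfold PySem.Dict.keys
    exact List.mem_map.mpr ⟨p, hp, h⟩
  have := (PySem.Dict.contains_iff_mem_keys d k).mpr hk
  rw [hc] at this; exact Bool.false_ne_true this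

theorem pv_insert_getD_self {d : Adj} {k : String} (hnd : KeysND d)
    (hc : d.contains k = true) : d.insert k (d.getD k PySem.Set.empty) = d := by
  apply PySem.Dict.ext
  rw [PySem.Dict.items_insert_of_contains d _ hc]
  have hpt : ∀ p ∈ d.items,
      (if (p.1 == k) = true then (k, d.getD k PySem.Set.empty) else p) = p := by
    intro p hp
    by_cases hpk : p.1 = k
    · rw [if_pos (by simp [hpk])]
      have hmem : (k, p.2) ∈ d.items := by
        have : p = (k, p.2) := by rw [← hpk]
        rw [← this]; exact hp
      have hv : d.getD k PySem.Set.empty = p.2 :=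
        PySem.Dict.getD_of_mem_items d hmem hnd _
      rw [hv, ← hpk]
    · rw [if_neg (by simp [hpk])]
  calc (d.items.map fun p => if (p.1 == k) = true then (k, d.getD k PySem.Set.empty) else p)
      = d.items.map id := List.map_congr_left (fun p hp => by simpa using hpt p hp)
    _ = d.items := List.map_id _

theorem pv_keysND_insert {d : Adj} (k : String) (v : List String)
    (h : KeysND d) : KeysND (d.insert k v) := by
  unfold KeysND at *
  by_cases hc : d.contains k = true
  · rw [PySem.Dict.keys_insert_of_contains d v hc]; exact h
  · have hc' : d.contains k = false := by simpa using hc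
    rw [PySem.Dict.keys_insert_of_not_contains d v hc']
    have hk : k ∉ d.keys := fun hm => by
      have := (PySem.Dict.contains_iff_mem_keys d k).mpr hm
      rw [hc'] at this; exact Bool.false_ne_true this
    rw [List.nodup_append]
    refine ⟨h, List.nodup_singleton _, ?_⟩
    intro a ha b hb
    rw [List.mem_singleton] at hb
    subst hb
    exact fun hab => hk (hab ▸ ha)

theorem pv_keysND_touch {d : Adj} (k : String) (h : KeysND d) : KeysND (pyTouch d k) := by
  unfold pyTouch
  split
  · exact h
  · exact pv_keysND_insert k _ h

theorem pv_keysND_modify {d : Adj} (k : String) (f : List String → List String)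
    (h : KeysND d) : KeysND (d.modify k PySem.Set.empty f) := by
  unfold KeysND at *
  rw [PySem.Dict.keys_modify]
  exact pv_keysND_insert k _ h

theorem pv_keysND_buildPair {d : Adj} (x y : String) (h : KeysND d) :
    KeysND (buildPair d x y) := by
  unfold buildPair
  split
  · exact pv_keysND_modify _ _ (pv_keysND_modify _ _ (pv_keysND_touch _ (pv_keysND_touch _ h)))
  · exact h

theorem pv_contains_touch_mono {d : Adj} {k : String} (a : String)
    (h : d.contains k = true) : (pyTouch d a).contains k = true := by
  unfold pyTouch
  split
  · exact h
  · rw [PySem.Dict.contains_insert]; simp [h]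

theorem pv_getD_touch_eq (d : Adj) (a k : String) :
    (pyTouch d a).getD k PySem.Set.empty = d.getD k PySem.Set.empty := by
  unfold pyTouch
  split
  · rfl
  · rename_i hc
    have hc' : d.contains a = false := by simpa using hc
    rw [PySem.Dict.getD_insert]
    by_cases hka : k = a
    · rw [if_pos hka, hka, PySem.Dict.getD_of_not_contains d _ hc']
    · rw [if_neg hka]

-- ---- set helper lemmas ----

theorem pv_update_snoc (s l : List String) (y : String) :
    PySem.Set.update s (l ++ [y]) = PySem.Set.add (PySem.Set.update s l) y := by
  rw [PySem.Set.update_eq_foldl, PySem.Set.update_eq_foldl, List.foldl_append]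
  rfl

theorem pv_update_singleton (s : List String) (z : String) :
    PySem.Set.update s [z] = PySem.Set.add s z := by
  rw [PySem.Set.update_eq_foldl]; rfl

theorem pv_update_sub {s : List String} : ∀ {l : List String}, (∀ z ∈ l, z ∈ s) →
    PySem.Set.update s l = s := by
  intro l
  induction l with
  | nil => intro _; rfl
  | cons z l ih =>
    intro h
    rw [PySem.Set.update_eq_foldl, List.foldl_cons,
      PySem.Set.add_of_mem (h z (by simp)), ← PySem.Set.update_eq_foldl]
    exact ih (fun w hw => h w (by simp [hw]))

theorem pv_ofList_singleton (z : String) : PySem.Set.ofList [z] = [z] := by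
  rw [PySem.Set.ofList_eq_foldl]
  show PySem.Set.add [] z = [z]
  unfold PySem.Set.add; simp

-- ---- nf toolkit ----

theorem pv_nf_id (d : Adj) (g : String → List String) :
    nf d (fun _ v => v) [] g = d := by
  apply PySem.Dict.ext
  simp [nf]

theorem pv_nf_congr {d : Adj} {m m' : String → List String → List String}
    {ks ks' : List String} {g g' : String → List String}
    (hm : ∀ p ∈ d.items, m p.1 p.2 = m' p.1 p.2)
    (hks : ks.filter (fun u => !(d.contains u)) = ks'.filter (fun u => !(d.contains u)))
    (hg : ∀ u ∈ ks.filter (fun u => !(d.contains u)), g u = g' u) :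
    nf d m ks g = nf d m' ks' g' := by
  have e1 : d.items.map (fun p => (p.1, m p.1 p.2)) = d.items.map (fun p => (p.1, m' p.1 p.2)) :=
    List.map_congr_left (fun p hp => by rw [hm p hp])
  have e2 : (ks.filter (fun u => !(d.contains u))).map (fun u => (u, g u))
      = (ks'.filter (fun u => !(d.contains u))).map (fun u => (u, g' u)) := by
    rw [← hks]
    exact List.map_congr_left (fun u hu => by rw [hg u hu])
  unfold nf
  rw [e1, e2]

theorem pv_contains_nf (d : Adj) (m : String → List String → List String)
    (ks : List String) (g : String → List String) (k : String) :
    (nf d m ks g).contains k = (d.contains k || ks.contains k) := by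
  unfold nf
  rw [PySem.Dict.contains_mk, List.any_append]
  have e1 : (d.items.map (fun p => (p.1, m p.1 p.2))).any (fun p => p.1 == k)
      = d.contains k := by
    rw [List.any_map]; rfl
  rw [e1]
  by_cases hc : d.contains k = true
  · simp [hc]
  · have hc' : d.contains k = false := by simpa using hc
    rw [hc']
    simp only [Bool.false_or]
    by_cases hk : k ∈ ks
    · have h2 : ((ks.filter (fun u => !(d.contains u))).map (fun u => (u, g u))).any
          (fun p => p.1 == k) = true := by
        rw [List.any_eq_true]
        exact ⟨(k, g k), List.mem_map.mpr ⟨k, List.mem_filter.mpr ⟨hk, by simp [hc']⟩, rfl⟩, by simp⟩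
      rw [h2, List.contains_eq_mem]; simp [hk]
    · have h2 : ((ks.filter (fun u => !(d.contains u))).map (fun u => (u, g u))).any
          (fun p => p.1 == k) = false := by
        rw [List.any_eq_false]
        intro p hp
        obtain ⟨u, hu, rfl⟩ := List.mem_map.mp hp
        have : u ∈ ks := (List.mem_filter.mp hu).1
        simp only [beq_iff_eq]
        intro h; exact hk (h ▸ this)
      rw [h2, List.contains_eq_mem]; simp [hk]

theorem pv_getD_nf_base {d : Adj} {m : String → List String → List String}
    {ks : List String} {g : String → List String} {k : String}
    (hc : d.contains k = true) :
    (nf d m ks g).getD k PySem.Set.empty = m k (d.getD k PySem.Set.empty) := by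
  obtain ⟨p, hp⟩ : ∃ p, d.items.find? (fun q => q.1 == k) = some p := by
    have hs : (d.items.find? (fun q => q.1 == k)).isSome = true := by
      rw [List.find?_isSome]
      have h2 := hc
      unfold PySem.Dict.contains at h2
      simpa [List.any_eq_true] using h2
    exact Option.isSome_iff_exists.mp hs
  have hpk : p.1 = k := by
    have h3 := List.find?_some hp
    simpa using h3
  have hcomp : ((fun (q : String × List String) => q.1 == k) ∘
      (fun (p : String × List String) => (p.1, m p.1 p.2)))
      = (fun (q : String × List String) => q.1 == k) := rfl
  have hmap : (d.items.map (fun p => (p.1, m p.1 p.2))).find? (fun q => q.1 == k)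
      = some (p.1, m p.1 p.2) := by
    rw [List.find?_map, hcomp, hp]
    rfl
  have hbase : d.getD k PySem.Set.empty = p.2 := by
    rw [PySem.Dict.getD_eq_get?_getD]
    simp only [PySem.Dict.get?]
    rw [hp]
    rfl
  have hitems : (nf d m ks g).items = (d.items.map (fun p => (p.1, m p.1 p.2)))
      ++ ((ks.filter (fun u => !(d.contains u))).map (fun u => (u, g u))) := rfl
  rw [PySem.Dict.getD_eq_get?_getD]
  simp only [PySem.Dict.get?]
  rw [hitems, List.find?_append, hmap, hbase]
  simp [Option.or, hpk]

theorem pv_getD_nf_ext {d : Adj} {m : String → List String → List String}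
    {ks : List String} {g : String → List String} {k : String}
    (hc : d.contains k = false) (hk : k ∈ ks) :
    (nf d m ks g).getD k PySem.Set.empty = g k := by
  have hcomp : ((fun (q : String × List String) => q.1 == k) ∘
      (fun (p : String × List String) => (p.1, m p.1 p.2)))
      = (fun (q : String × List String) => q.1 == k) := rfl
  have hnone : d.items.find? (fun q => q.1 == k) = none :=
    List.find?_eq_none.mpr (fun p hp => by simp [pv_not_contains_ne hc p hp])
  have hbase : (d.items.map (fun p => (p.1, m p.1 p.2))).find? (fun q => q.1 == k) = none := by
    rw [List.find?_map, hcomp, hnone]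
    rfl
  have hextmem : k ∈ ks.filter (fun u => !(d.contains u)) :=
    List.mem_filter.mpr ⟨hk, by simp [hc]⟩
  obtain ⟨u, hu⟩ : ∃ u, (ks.filter (fun u => !(d.contains u))).find? (fun z => z == k) = some u := by
    have hs : ((ks.filter (fun u => !(d.contains u))).find? (fun z => z == k)).isSome = true := by
      rw [List.find?_isSome]
      exact ⟨k, hextmem, by simp⟩
    exact Option.isSome_iff_exists.mp hs
  have huk : u = k := by
    have h3 := List.find?_some hu
    simpa using h3
  have hcomp2 : ((fun (q : String × List String) => q.1 == k) ∘
      (fun (u : String) => (u, g u))) = (fun (z : String) => z == k) := rfl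
  have hext : ((ks.filter (fun u => !(d.contains u))).map (fun u => (u, g u))).find?
      (fun q => q.1 == k) = some (u, g u) := by
    rw [List.find?_map, hcomp2, hu]
    rfl
  have hitems : (nf d m ks g).items = (d.items.map (fun p => (p.1, m p.1 p.2)))
      ++ ((ks.filter (fun u => !(d.contains u))).map (fun u => (u, g u))) := rfl
  rw [PySem.Dict.getD_eq_get?_getD]
  simp only [PySem.Dict.get?]
  rw [hitems, List.find?_append, hbase]
  simp [Option.or, hext, huk]

theorem pv_insert_new_nf {d : Adj} {m : String → List String → List String}
    {ks : List String} {g : String → List String} {k : String} (v : List String)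
    (h1 : d.contains k = false) (h2 : k ∉ ks) :
    (nf d m ks g).insert k v
      = nf d m (ks ++ [k]) (fun u => if u = k then v else g u) := by
  have hks' : ks.contains k = false := by
    rw [List.contains_eq_mem]; simp [h2]
  have hco : (nf d m ks g).contains k = false := by
    rw [pv_contains_nf, h1, hks']; rfl
  apply PySem.Dict.ext
  rw [PySem.Dict.items_insert_of_not_contains _ _ hco]
  show (d.items.map _ ++ (ks.filter _).map _) ++ [(k, v)]
      = d.items.map _ ++ ((ks ++ [k]).filter (fun u => !(d.contains u))).map _
  rw [List.filter_append]
  have h3 : [k].filter (fun u => !(d.contains u)) = [k] := by simp [h1]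
  rw [h3, List.map_append]
  have h4 : (ks.filter (fun u => !(d.contains u))).map (fun u => (u, if u = k then v else g u))
      = (ks.filter (fun u => !(d.contains u))).map (fun u => (u, g u)) := by
    apply List.map_congr_left
    intro u hu
    have hu' : u ∈ ks := (List.mem_filter.mp hu).1
    rw [if_neg (fun h => h2 (by rw [← h]; exact hu'))]
  rw [h4]
  simp [List.append_assoc]

theorem pv_touch_nf_mem {d : Adj} {m : String → List String → List String}
    {ks : List String} {g : String → List String} {k : String}
    (h : d.contains k = true ∨ k ∈ ks) :
    pyTouch (nf d m ks g) k = nf d m ks g := by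
  have hco : (nf d m ks g).contains k = true := by
    rw [pv_contains_nf]
    rcases h with h | h
    · simp [h]
    · rw [List.contains_eq_mem]; simp [h]
  unfold pyTouch
  rw [if_pos hco]

theorem pv_touch_nf_gen {d : Adj} {m : String → List String → List String}
    {ks : List String} {g : String → List String} {k : String}
    (h2 : k ∉ ks) :
    pyTouch (nf d m ks g) k
      = nf d m (ks ++ (if d.contains k = true then [] else [k]))
          (fun u => if u = k then PySem.Set.empty else g u) := by
  by_cases hc : d.contains k = true
  · rw [pv_touch_nf_mem (Or.inl hc), if_pos hc]
    apply pv_nf_congr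
    · intro p _; rfl
    · rw [List.append_nil]
    · intro u hu
      have hu' : u ∈ ks := (List.mem_filter.mp hu).1
      rw [if_neg (fun h => h2 (by rw [← h]; exact hu'))]
  · have hc' : d.contains k = false := by simpa using hc
    rw [if_neg hc]
    have hco : (nf d m ks g).contains k = false := by
      rw [pv_contains_nf, hc', List.contains_eq_mem]
      simp [h2]
    unfold pyTouch
    rw [if_neg (by simp [hco])]
    exact pv_insert_new_nf _ hc' h2

theorem pv_modify_nf {d : Adj} {m : String → List String → List String}
    {ks : List String} {g : String → List String} {k : String}
    (f : List String → List String)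
    (hnd : KeysND d) (hk : d.contains k = true ∨ k ∈ ks) :
    (nf d m ks g).modify k PySem.Set.empty f
      = nf d (fun j v => if j = k then f (m j v) else m j v) ks
          (fun u => if u = k then f (g u) else g u) := by
  have hco : (nf d m ks g).contains k = true := by
    rw [pv_contains_nf]
    rcases hk with h | h
    · simp [h]
    · rw [List.contains_eq_mem]; simp [h]
  show (nf d m ks g).insert k (f ((nf d m ks g).getD k PySem.Set.empty)) = _
  by_cases hc : d.contains k = true
  · rw [pv_getD_nf_base hc]
    apply PySem.Dict.ext
    rw [PySem.Dict.items_insert_of_contains _ _ hco]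
    show ((d.items.map _ ++ (ks.filter _).map _).map _) = _
    rw [List.map_append, List.map_map, List.map_map]
    congr 1
    · apply List.map_congr_left
      intro p hp
      show (if ((p.1, m p.1 p.2).1 == k) = true
          then (k, f (m k (d.getD k PySem.Set.empty))) else (p.1, m p.1 p.2))
        = (p.1, if p.1 = k then f (m p.1 p.2) else m p.1 p.2)
      by_cases hpk : p.1 = k
      · have hmem : (k, p.2) ∈ d.items := by
          have hpe : p = (k, p.2) := by rw [← hpk]
          rw [← hpe]; exact hp
        have hv : d.getD k ([] : List String) = p.2 :=
          PySem.Dict.getD_of_mem_items d hmem hnd _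
        have hv2 : d.getD k PySem.Set.empty = p.2 := hv
        simp [hpk, hv, hv2]
      · simp [hpk]
    · apply List.map_congr_left
      intro u hu
      have hu2 : d.contains u = false := by
        have := (List.mem_filter.mp hu).2
        simpa using this
      have hne : u ≠ k := fun h => by
        rw [h] at hu2; rw [hu2] at hc; exact Bool.false_ne_true hc
      show (if ((u, g u).1 == k) = true
          then (k, f (m k (d.getD k PySem.Set.empty))) else (u, g u))
        = (u, if u = k then f (g u) else g u)
      simp [hne]
  · have hc' : d.contains k = false := by simpa using hc
    have hkks : k ∈ ks := by
      rcases hk with h | h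
      · rw [hc'] at h; exact absurd h (by simp)
      · exact h
    rw [pv_getD_nf_ext hc' hkks]
    apply PySem.Dict.ext
    rw [PySem.Dict.items_insert_of_contains _ _ hco]
    show ((d.items.map _ ++ (ks.filter _).map _).map _) = _
    rw [List.map_append, List.map_map, List.map_map]
    congr 1
    · apply List.map_congr_left
      intro p hp
      have hne := pv_not_contains_ne hc' p hp
      show (if ((p.1, m p.1 p.2).1 == k) = true then (k, f (g k)) else (p.1, m p.1 p.2))
        = (p.1, if p.1 = k then f (m p.1 p.2) else m p.1 p.2)
      simp [hne]
    · apply List.map_congr_left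
      intro u hu
      by_cases huk : u = k
      · simp [huk]
      · simp [huk]

theorem pv_keysND_nf {d : Adj} {m : String → List String → List String}
    {ks : List String} {g : String → List String}
    (hnd : KeysND d) (hks : ks.Nodup) : KeysND (nf d m ks g) := by
  unfold KeysND at *
  unfold nf
  rw [PySem.Dict.keys_mk, List.map_append, List.map_map, List.map_map]
  have e1 : d.items.map ((fun (x : String × List String) => x.1)
      ∘ (fun p => (p.1, m p.1 p.2))) = d.keys := rfl
  have e2 : (ks.filter (fun u => !(d.contains u))).map
      ((fun (x : String × List String) => x.1) ∘ (fun u => (u, g u)))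
      = ks.filter (fun u => !(d.contains u)) := by
    have hcomp : ((fun (x : String × List String) => x.1) ∘ (fun (u : String) => (u, g u)))
        = id := rfl
    rw [hcomp, List.map_id]
  rw [e1, e2, List.nodup_append]
  refine ⟨hnd, hks.filter _, ?_⟩
  intro a ha b hb
  intro heq
  subst heq
  have hc : d.contains a = false := by
    have := (List.mem_filter.mp hb).2
    simpa using this
  have h3 := (PySem.Dict.contains_iff_mem_keys d a).mpr ha
  rw [hc] at h3
  exact Bool.false_ne_true h3

-- ---- Linked: establishment, preservation, triviality ----

theorem pv_buildPair_self (d : Adj) (x : String) : buildPair d x x = d := by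
  unfold buildPair; simp

theorem pv_linked_est {d : Adj} {x y : String} (hxy : x ≠ y) :
    Linked (buildPair d x y) x y := by
  unfold buildPair
  rw [if_pos hxy]
  refine ⟨?_, ?_, ?_, ?_⟩
  · rw [PySem.Dict.contains_modify, PySem.Dict.contains_modify]
    simp
  · rw [PySem.Dict.contains_modify]
    simp
  · rw [PySem.Dict.getD_modify, if_neg hxy, PySem.Dict.getD_modify, if_pos rfl]
    rw [PySem.Set.mem_add]
    exact Or.inr rfl
  · rw [PySem.Dict.getD_modify, if_pos rfl]
    rw [PySem.Set.mem_add]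
    exact Or.inr rfl

theorem pv_mem_getD_modify_add {d : Adj} {k e : String} (a w : String)
    (h : e ∈ d.getD k PySem.Set.empty) :
    e ∈ (d.modify a PySem.Set.empty (fun s => PySem.Set.add s w)).getD k PySem.Set.empty := by
  rw [PySem.Dict.getD_modify]
  by_cases hka : k = a
  · rw [if_pos hka, PySem.Set.mem_add]
    left
    rw [← hka]
    exact h
  · rw [if_neg hka]
    exact h

theorem pv_linked_pres {d : Adj} {x y : String} (a b : String)
    (h : Linked d x y) : Linked (buildPair d a b) x y := by
  obtain ⟨h1, h2, h3, h4⟩ := h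
  unfold buildPair
  split
  · refine ⟨?_, ?_, ?_, ?_⟩
    · rw [PySem.Dict.contains_modify, PySem.Dict.contains_modify]
      simp [pv_contains_touch_mono b (pv_contains_touch_mono a h1)]
    · rw [PySem.Dict.contains_modify, PySem.Dict.contains_modify]
      simp [pv_contains_touch_mono b (pv_contains_touch_mono a h2)]
    · have hx' : y ∈ (pyTouch (pyTouch d a) b).getD x PySem.Set.empty := by
        rw [pv_getD_touch_eq, pv_getD_touch_eq]; exact h3
      exact pv_mem_getD_modify_add b a (pv_mem_getD_modify_add a b hx')
    · have hy' : x ∈ (pyTouch (pyTouch d a) b).getD y PySem.Set.empty := by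
        rw [pv_getD_touch_eq, pv_getD_touch_eq]; exact h4
      exact pv_mem_getD_modify_add b a (pv_mem_getD_modify_add a b hy')
  · exact ⟨h1, h2, h3, h4⟩

theorem pv_linked_triv {d : Adj} {x y : String} (hnd : KeysND d)
    (h : Linked d x y) : buildPair d x y = d := by
  by_cases hxy : x = y
  · rw [hxy]; exact pv_buildPair_self d y
  · obtain ⟨h1, h2, h3, h4⟩ := h
    unfold buildPair
    rw [if_pos hxy]
    have e1 : pyTouch d x = d := by unfold pyTouch; rw [if_pos h1]
    have e2 : pyTouch d y = d := by unfold pyTouch; rw [if_pos h2]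
    rw [e1, e2]
    have e3 : d.modify x PySem.Set.empty (fun s => PySem.Set.add s y) = d := by
      show d.insert x (PySem.Set.add (d.getD x PySem.Set.empty) y) = d
      rw [PySem.Set.add_of_mem h3]
      exact pv_insert_getD_self hnd h1
    rw [e3]
    show d.insert y (PySem.Set.add (d.getD y PySem.Set.empty) x) = d
    rw [PySem.Set.add_of_mem h4]
    exact pv_insert_getD_self hnd h2

-- ---- closed-form lemmas for the A side ----

theorem pv_extra_nil (x k : String) : extra x [] k = [] := by
  unfold extra
  by_cases hk : k = x
  · simp [hk]
  · rw [if_neg hk, if_neg (by simp)]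

theorem pv_extra_snoc_self (x : String) (P : List String) (k : String) :
    extra x (P ++ [x]) k = extra x P k := by
  unfold extra
  by_cases hk : k = x
  · rw [if_pos hk, if_pos hk, List.filter_append]
    simp
  · rw [if_neg hk, if_neg hk]
    have hiff : (k ∈ P ++ [x]) ↔ k ∈ P := by simp [hk]
    by_cases hkP : k ∈ P
    · rw [if_pos hkP, if_pos (hiff.mpr hkP)]
    · rw [if_neg (fun h => hkP (hiff.mp h)), if_neg hkP]

theorem pv_kForm_nil (U Q : List String) (x : String) (d : Adj) :
    kForm U Q x [] d = hqForm U Q d := by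
  unfold kForm hqForm
  apply pv_nf_congr
  · intro p _
    unfold kM hqM
    rw [pv_extra_nil, List.append_nil]
  · rfl
  · intro u _
    rw [pv_extra_nil, List.append_nil]

theorem pv_sel_absorb {U Q R : List String} {x : String} (hU : U.Nodup)
    (hsplit : Q ++ x :: R = U) {j : String} (hjU : j ∈ U) (v : List String) :
    PySem.Set.update v (selQ U Q j ++ extra x U j)
      = PySem.Set.update v (selQ U (Q ++ [x]) j) := by
  have hxU : x ∈ U := by rw [← hsplit]; exact List.mem_append_right _ (by simp)
  have hxQ : x ∉ Q := by
    have h := hU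
    rw [← hsplit, List.nodup_append] at h
    exact fun hx => (h.2.2 x hx x (by simp)) rfl
  by_cases hjx : j = x
  · subst hjx
    have hs1 : selQ U Q j = Q.filter (fun a => a ≠ j) := by unfold selQ; rw [if_neg hxQ]
    have he : extra j U j = U.filter (fun a => a ≠ j) := by unfold extra; rw [if_pos rfl]
    have hs2 : selQ U (Q ++ [j]) j = U.filter (fun a => a ≠ j) := by
      unfold selQ; rw [if_pos (by simp)]
    rw [hs1, he, hs2]
    have hUf : U.filter (fun a => a ≠ j)
        = Q.filter (fun a => a ≠ j) ++ R.filter (fun a => a ≠ j) := by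
      rw [← hsplit, List.filter_append, List.filter_cons]
      simp
    rw [hUf, PySem.Set.update_append, PySem.Set.update_append, PySem.Set.update_append]
    rw [pv_update_sub (fun z hz => (PySem.Set.mem_update _ _ _).mpr (Or.inr hz))]
  · by_cases hjQ : j ∈ Q
    · have hs1 : selQ U Q j = U.filter (fun a => a ≠ j) := by unfold selQ; rw [if_pos hjQ]
      have he : extra x U j = [x] := by unfold extra; rw [if_neg hjx, if_pos hjU]
      have hs2 : selQ U (Q ++ [x]) j = U.filter (fun a => a ≠ j) := by
        unfold selQ; rw [if_pos (by simp [hjQ])]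
      rw [hs1, he, hs2, pv_update_snoc]
      have hmem : x ∈ PySem.Set.update v (U.filter (fun a => a ≠ j)) :=
        (PySem.Set.mem_update _ _ _).mpr
          (Or.inr (List.mem_filter.mpr ⟨hxU, by simp [Ne.symm hjx]⟩))
      rw [PySem.Set.add_of_mem hmem]
    · have hs1 : selQ U Q j = Q.filter (fun a => a ≠ j) := by unfold selQ; rw [if_neg hjQ]
      have he : extra x U j = [x] := by unfold extra; rw [if_neg hjx, if_pos hjU]
      have hs2 : selQ U (Q ++ [x]) j = Q.filter (fun a => a ≠ j) ++ [x] := by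
        unfold selQ
        rw [if_neg (by simp [hjQ, hjx]), List.filter_append]
        congr 1
        simp [Ne.symm hjx]
      rw [hs1, he, hs2]

theorem pv_glue2 {U Q R : List String} {x : String} (hU : U.Nodup)
    (hsplit : Q ++ x :: R = U) (d : Adj) :
    kForm U Q x U d = hqForm U (Q ++ [x]) d := by
  unfold kForm hqForm
  apply pv_nf_congr
  · intro p _
    unfold kM hqM
    by_cases hpU : p.1 ∈ U
    · rw [if_pos hpU, if_pos hpU]
      exact pv_sel_absorb hU hsplit hpU p.2
    · rw [if_neg hpU, if_neg hpU]
  · rfl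
  · intro u hu
    have huU : u ∈ U := (List.mem_filter.mp hu).1
    rw [← PySem.Set.update_nil_left, ← PySem.Set.update_nil_left]
    exact pv_sel_absorb hU hsplit huU []

theorem pv_step_step {U Q P R2 R3 : List String} {x y : String} (hU : U.Nodup)
    (hsplitQ : Q ++ x :: R2 = U) (hsp : P ++ y :: R3 = U) (d : Adj) (hnd : KeysND d) :
    buildPair (kForm U Q x P d) x y = kForm U Q x (P ++ [y]) d := by
  have hxU : x ∈ U := by rw [← hsplitQ]; exact List.mem_append_right _ (by simp)
  have hyU : y ∈ U := by rw [← hsp]; exact List.mem_append_right _ (by simp)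
  have hyP : y ∉ P := by
    have h := hU
    rw [← hsp, List.nodup_append] at h
    exact fun hy => (h.2.2 y hy y (by simp)) rfl
  by_cases hyx : y = x
  · subst hyx
    rw [pv_buildPair_self]
    unfold kForm
    apply pv_nf_congr
    · intro p _
      unfold kM
      rw [pv_extra_snoc_self]
    · rfl
    · intro u _
      rw [pv_extra_snoc_self]
  · have hxy : x ≠ y := fun h => hyx h.symm
    unfold buildPair
    rw [if_pos hxy]
    unfold kForm
    rw [pv_touch_nf_mem (Or.inr hxU), pv_touch_nf_mem (Or.inr hyU),
        pv_modify_nf _ hnd (Or.inr hxU), pv_modify_nf _ hnd (Or.inr hyU)]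
    apply pv_nf_congr
    · intro p _
      obtain ⟨j, v⟩ := p
      dsimp only
      by_cases hjx : j = x
      · rw [hjx]
        rw [if_neg hxy, if_pos rfl]
        unfold kM
        rw [if_pos hxU, if_pos hxU]
        unfold extra
        rw [if_pos rfl, if_pos rfl, List.filter_append]
        have hfy : [y].filter (fun a => a ≠ x) = [y] := by simp [hyx]
        rw [hfy, ← List.append_assoc, pv_update_snoc]
      · by_cases hjy : j = y
        · rw [hjy]
          rw [if_pos rfl, if_neg hyx]
          unfold kM
          rw [if_pos hyU, if_pos hyU]
          unfold extra
          rw [if_neg hyx, if_neg hyx, if_neg hyP, if_pos (by simp)]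
          rw [List.append_nil, pv_update_snoc]
        · rw [if_neg hjy, if_neg hjx]
          unfold kM
          by_cases hjU : j ∈ U
          · rw [if_pos hjU, if_pos hjU]
            unfold extra
            rw [if_neg hjx, if_neg hjx]
            have hiff : (j ∈ P ++ [y]) ↔ j ∈ P := by simp [hjy]
            by_cases hjP : j ∈ P
            · rw [if_pos hjP, if_pos (hiff.mpr hjP)]
            · rw [if_neg hjP, if_neg (fun h => hjP (hiff.mp h))]
          · rw [if_neg hjU, if_neg hjU]
    · rfl
    · intro u hu
      dsimp only
      by_cases hux : u = x
      · rw [hux]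
        rw [if_neg hxy, if_pos rfl]
        unfold extra
        rw [if_pos rfl, if_pos rfl, List.filter_append]
        have hfy : [y].filter (fun a => a ≠ x) = [y] := by simp [hyx]
        rw [hfy, ← List.append_assoc, PySem.Set.ofList_append_singleton]
      · by_cases huy : u = y
        · rw [huy]
          rw [if_pos rfl, if_neg hyx]
          unfold extra
          rw [if_neg hyx, if_neg hyx, if_neg hyP, if_pos (by simp)]
          rw [List.append_nil, PySem.Set.ofList_append_singleton]
        · rw [if_neg huy, if_neg hux]
          unfold extra
          rw [if_neg hux, if_neg hux]
          have hiff : (u ∈ P ++ [y]) ↔ u ∈ P := by simp [huy]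
          by_cases huP : u ∈ P
          · rw [if_pos huP, if_pos (hiff.mpr huP)]
          · rw [if_neg huP, if_neg (fun h => huP (hiff.mp h))]

theorem pv_lem_step {U Q R : List String} {x : String} (hU : U.Nodup)
    (hsplit : Q ++ x :: R = U) (d : Adj) (hnd : KeysND d) :
    U.foldl (fun s y => buildPair s x y) (hqForm U Q d) = hqForm U (Q ++ [x]) d := by
  have main : ∀ (R2 P : List String), P ++ R2 = U →
      R2.foldl (fun s y => buildPair s x y) (kForm U Q x P d) = kForm U Q x U d := by
    intro R2
    induction R2 with
    | nil => intro P h; rw [List.append_nil] at h; rw [h]; rfl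
    | cons y R3 ih =>
      intro P h
      rw [List.foldl_cons]
      show R3.foldl (fun s y => buildPair s x y) (buildPair (kForm U Q x P d) x y) = _
      rw [pv_step_step hU hsplit h d hnd]
      exact ih (P ++ [y]) (by rw [List.append_assoc]; exact h)
  have h0 := pv_kForm_nil U Q x d
  rw [← h0, main U [] (by simp)]
  exact pv_glue2 hU hsplit d

theorem pv_lem_outer {U : List String} (hU : U.Nodup) (d : Adj) (hnd : KeysND d) :
    ∀ (R Q : List String), Q ≠ [] → Q ++ R = U →
      R.foldl (fun s x => U.foldl (fun s' y => buildPair s' x y) s) (hqForm U Q d)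
        = hqForm U U d := by
  intro R
  induction R with
  | nil =>
    intro Q _ hsplit
    rw [List.append_nil] at hsplit
    rw [hsplit]
    rfl
  | cons x R' ih =>
    intro Q hQ hsplit
    rw [List.foldl_cons]
    show R'.foldl (fun s x => U.foldl (fun s' y => buildPair s' x y) s)
        (U.foldl (fun s' y => buildPair s' x y) (hqForm U Q d)) = hqForm U U d
    rw [pv_lem_step hU hsplit d hnd]
    exact ih (Q ++ [x]) (by simp) (by rw [List.append_assoc]; exact hsplit)

theorem pv_first_step {U : List String} (hU : U.Nodup) {u0 : String} (hh : U.head? = some u0)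
    {P R' : List String} {y : String} (hsp : P ++ y :: R' = U) (d : Adj) (hnd : KeysND d) :
    buildPair (k0Form u0 P d) u0 y = k0Form u0 (P ++ [y]) d := by
  cases P with
  | nil =>
    have hy : y = u0 := by
      rw [← hsp] at hh
      simpa using hh
    subst hy
    have e1 : k0Form y [] d = d := by unfold k0Form; rw [if_pos (by simp)]
    have e2 : k0Form y ([] ++ [y]) d = d := by unfold k0Form; rw [if_pos (by simp)]
    rw [e1, e2]
    exact pv_buildPair_self d y
  | cons p P' =>
    have hp : p = u0 := by rw [← hsp] at hh; simpa using hh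
    rw [← hp]
    have hUnd := hU
    rw [← hsp, List.nodup_append] at hUnd
    have hyP : y ∉ p :: P' := fun hy => (hUnd.2.2 y hy y (by simp)) rfl
    have hyp : y ≠ p := fun h => hyP (by simp [h])
    have hpy : p ≠ y := fun h => hyp h.symm
    have hadd1 : ∀ z : String, PySem.Set.add PySem.Set.empty z = [z] := by
      intro z
      rw [PySem.Set.add_of_not_mem (by simp)]
      rfl
    cases P' with
    | nil =>
      have e1 : k0Form p [p] d = d := by unfold k0Form; rw [if_pos (by simp)]
      rw [e1]
      have e2 : k0Form p ([p] ++ [y]) d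
          = nf d (k0M p ([p] ++ [y])) ([p] ++ [y])
              (fun u => if u = p then PySem.Set.ofList (([p] ++ [y]).filter (fun a => a ≠ p)) else [p]) := by
        unfold k0Form; rw [if_neg (by simp)]
      rw [e2]
      unfold buildPair
      rw [if_pos hpy]
      have e0 : d = nf d (fun _ v => v) []
          (fun u => if u = p then PySem.Set.ofList (([p] ++ [y]).filter (fun a => a ≠ p)) else [p]) :=
        (pv_nf_id d _).symm
      conv_lhs => rw [e0]
      rw [pv_touch_nf_gen (by simp)]
      rw [pv_touch_nf_gen (by
        intro h
        rcases List.mem_append.mp h with h' | h'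
        · simp at h'
        · revert h'
          split
          · simp
          · simp [hyp])]
      rw [pv_modify_nf _ hnd (by
        by_cases hcp : d.contains p = true
        · exact Or.inl hcp
        · exact Or.inr (by simp [hcp]))]
      rw [pv_modify_nf _ hnd (by
        by_cases hcy : d.contains y = true
        · exact Or.inl hcy
        · exact Or.inr (by simp [hcy]))]
      apply pv_nf_congr
      · intro q hq
        obtain ⟨j, v⟩ := q
        dsimp only
        by_cases hjp : j = p
        · rw [hjp]
          unfold k0M
          simp [hpy, hyp, pv_update_singleton]
        · by_cases hjy : j = y
          · rw [hjy]
            unfold k0M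
            simp [hyp]
          · unfold k0M
            simp [hjp, hjy]
      · by_cases hcp : d.contains p = true <;> by_cases hcy : d.contains y = true <;>
          simp [hcp, hcy]
      · intro u hu
        have hu1 := (List.mem_filter.mp hu).1
        have hu2 : u = p ∨ u = y := by
          rcases List.mem_append.mp hu1 with h | h
          · rcases List.mem_append.mp h with h' | h'
            · exact absurd h' (by simp)
            · left
              by_cases hcp : d.contains p = true
              · rw [if_pos hcp] at h'; exact absurd h' (by simp)
              · rw [if_neg hcp] at h'; simpa using h'
          · right
            by_cases hcy : d.contains y = true
            · rw [if_pos hcy] at h; exact absurd h (by simp)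
            · rw [if_neg hcy] at h; simpa using h
        rcases hu2 with h | h
        · rw [h]
          simp [hpy, hyp, hadd1, pv_ofList_singleton]
        · rw [h]
          simp [hpy, hyp, hadd1]
    | cons w P'' =>
      have hpP : p ∈ p :: w :: P'' := by simp
      have e1 : k0Form p (p :: w :: P'') d
          = nf d (k0M p (p :: w :: P'')) (p :: w :: P'')
              (fun u => if u = p then PySem.Set.ofList ((p :: w :: P'').filter (fun a => a ≠ p)) else [p]) := by
        unfold k0Form; rw [if_neg (by simp)]
      have e2 : k0Form p ((p :: w :: P'') ++ [y]) d
          = nf d (k0M p ((p :: w :: P'') ++ [y])) ((p :: w :: P'') ++ [y])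
              (fun u => if u = p then PySem.Set.ofList (((p :: w :: P'') ++ [y]).filter (fun a => a ≠ p)) else [p]) := by
        unfold k0Form; rw [if_neg (by simp)]
      rw [e1, e2]
      unfold buildPair
      rw [if_pos hpy]
      rw [pv_touch_nf_mem (Or.inr hpP)]
      rw [pv_touch_nf_gen hyP]
      rw [pv_modify_nf _ hnd (Or.inr (List.mem_append_left _ hpP))]
      rw [pv_modify_nf _ hnd (by
        by_cases hcy : d.contains y = true
        · exact Or.inl hcy
        · exact Or.inr (by simp [hcy]))]
      have hfy : [y].filter (fun a => a ≠ p) = [y] := by simp [hyp]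
      apply pv_nf_congr
      · intro q hq
        obtain ⟨j, v⟩ := q
        dsimp only
        by_cases hjp : j = p
        · rw [hjp]
          rw [if_neg hpy, if_pos rfl]
          unfold k0M
          rw [if_pos rfl, if_pos rfl, List.filter_append, hfy, pv_update_snoc]
        · by_cases hjy : j = y
          · rw [hjy]
            rw [if_pos rfl, if_neg hyp]
            unfold k0M
            rw [if_neg hyp, if_neg hyp, if_neg hyP, if_pos (by simp)]
          · rw [if_neg hjy, if_neg hjp]
            unfold k0M
            rw [if_neg hjp, if_neg hjp]
            have hiff : (j ∈ (p :: w :: P'') ++ [y]) ↔ j ∈ p :: w :: P'' := by simp [hjy]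
            by_cases hjP : j ∈ p :: w :: P''
            · rw [if_pos hjP, if_pos (hiff.mpr hjP)]
            · rw [if_neg hjP, if_neg (fun h => hjP (hiff.mp h))]
      · rw [List.filter_append, List.filter_append]
        congr 1
        by_cases hcy : d.contains y = true <;> simp [hcy]
      · intro u hu
        dsimp only
        by_cases hup : u = p
        · rw [hup]
          simp only [if_neg hpy, if_pos rfl]
          rw [List.filter_append, hfy, PySem.Set.ofList_append_singleton]
          simp
        · by_cases huy : u = y
          · rw [huy]
            simp only [if_pos rfl, if_neg hyp]
            simp [hyp, hadd1]
          · simp [hup, huy]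

theorem pv_glue0 {U : List String} (h2 : 1 < U.length) {u0 : String}
    (hh : U.head? = some u0) (d : Adj) :
    k0Form u0 U d = hqForm U [u0] d := by
  have hu0U : u0 ∈ U := List.mem_of_mem_head? (by simp [hh])
  unfold k0Form
  rw [if_neg (by omega)]
  unfold hqForm
  apply pv_nf_congr
  · intro p _
    unfold k0M hqM selQ
    by_cases hp0 : p.1 = u0
    · simp [hp0, hu0U]
    · by_cases hpU : p.1 ∈ U
      · rw [if_neg hp0, if_pos hpU, if_pos hpU, if_neg (by simp [hp0])]
        have h5 : [u0].filter (fun a => a ≠ p.1) = [u0] := by simp [Ne.symm hp0]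
        rw [h5, pv_update_singleton]
      · simp [hp0, hpU]
  · rfl
  · intro u hu
    unfold selQ
    by_cases hu0 : u = u0
    · simp [hu0]
    · have h5 : [u0].filter (fun a => a ≠ u) = [u0] := by simp [Ne.symm hu0]
      rw [if_neg hu0, if_neg (by simp [hu0]), h5, pv_ofList_singleton]

theorem pv_lem_first {U : List String} (hU : U.Nodup) (h2 : 1 < U.length)
    {u0 : String} (hh : U.head? = some u0) (d : Adj) (hnd : KeysND d) :
    U.foldl (fun s y => buildPair s u0 y) d = hqForm U [u0] d := by
  have main : ∀ (R P : List String), P ++ R = U →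
      R.foldl (fun s y => buildPair s u0 y) (k0Form u0 P d) = k0Form u0 U d := by
    intro R
    induction R with
    | nil => intro P h; rw [List.append_nil] at h; rw [h]; rfl
    | cons y R' ih =>
      intro P h
      rw [List.foldl_cons]
      show R'.foldl (fun s y => buildPair s u0 y) (buildPair (k0Form u0 P d) u0 y) = _
      rw [pv_first_step hU hh h d hnd]
      exact ih (P ++ [y]) (by rw [List.append_assoc]; exact h)
  have h0 : k0Form u0 [] d = d := by unfold k0Form; rw [if_pos (by simp)]
  have hm := main U [] (by simp)
  rw [h0] at hm
  rw [hm]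
  exact pv_glue0 h2 hh d

-- ---- per-article closed form of A ----

theorem pv_glue (U : List String) (d : Adj) : hqForm U U d = gForm U U d := by
  unfold hqForm gForm
  apply pv_nf_congr
  · intro p _
    unfold hqM gM selQ
    by_cases hpU : p.1 ∈ U
    · rw [if_pos hpU, if_pos hpU, if_pos hpU]
    · rw [if_neg hpU, if_neg hpU]
  · rfl
  · intro u hu
    have huU : u ∈ U := (List.mem_filter.mp hu).1
    unfold selQ
    rw [if_pos huU]

theorem pv_A_small {L : List String} (hle : (PySem.List.dedup L).length ≤ 1) (d : Adj) :
    buildArticle d L = d := by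
  have hall : ∀ a ∈ L, ∀ b ∈ L, a = b := by
    intro a ha b hb
    have ha' : a ∈ PySem.List.dedup L := (PySem.List.mem_dedup L a).mpr ha
    have hb' : b ∈ PySem.List.dedup L := (PySem.List.mem_dedup L b).mpr hb
    cases hd : PySem.List.dedup L with
    | nil => rw [hd] at ha'; simp at ha'
    | cons c t =>
      have ht : t = [] := by
        rw [hd] at hle
        simpa using hle
      subst ht
      rw [hd] at ha' hb'
      simp at ha' hb'
      rw [ha', hb']
  unfold buildArticle
  apply pv_foldl_id
  intro x hx
  apply pv_foldl_id
  intro y hy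
  rw [hall x hx y hy]
  exact pv_buildPair_self d y

theorem pv_foldl_head {σ α : Type} {f : σ → α → σ} {l : List α} {a : α}
    (h : l.head? = some a) (s : σ) : l.foldl f s = l.tail.foldl f (f s a) := by
  cases l with
  | nil => simp at h
  | cons b t =>
    have hba : b = a := by simpa using h
    subst hba
    rfl

theorem pv_A_big {L : List String} (h2 : 1 < (PySem.List.dedup L).length)
    (d : Adj) (hnd : KeysND d) :
    buildArticle d L = hqForm (PySem.List.dedup L) (PySem.List.dedup L) d := by
  have hU : (PySem.List.dedup L).Nodup := PySem.List.nodup_dedup L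
  have hstep1 : buildArticle d L
      = L.foldl (fun s x => (PySem.List.dedup L).foldl (fun s' y => buildPair s' x y) s) d := by
    show L.foldl (fun s x => L.foldl (fun s' y => buildPair s' x y) s) d = _
    apply pv_foldl_congr_inv KeysND
    · intro s a hs
      exact pv_foldl_inv KeysND (fun s' y hs' => pv_keysND_buildPair _ _ hs') _ s hs
    · intro s x hs
      exact pv_foldl_dedup KeysND (fun y s' => y = x ∨ Linked s' x y)
        (fun s' z hs' => pv_keysND_buildPair _ _ hs')
        (fun s' z _ => by
          by_cases hzx : z = x
          · exact Or.inl hzx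
          · exact Or.inr (pv_linked_est (fun h => hzx h.symm)))
        (fun s' z w h => h.imp id (pv_linked_pres _ _))
        (fun s' z hs' h => by
          rcases h with h | h
          · rw [h]; exact pv_buildPair_self s' x
          · exact pv_linked_triv hs' h)
        L s hs
    · exact hnd
  have hstep2 : L.foldl (fun s x => (PySem.List.dedup L).foldl (fun s' y => buildPair s' x y) s) d
      = (PySem.List.dedup L).foldl
          (fun s x => (PySem.List.dedup L).foldl (fun s' y => buildPair s' x y) s) d := by
    apply pv_foldl_dedup KeysND
      (fun x s => ∀ y ∈ PySem.List.dedup L, y ≠ x → Linked s x y)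
      (fun s x hs => pv_foldl_inv KeysND (fun s' y hs' => pv_keysND_buildPair _ _ hs') _ s hs)
      (fun s x hs => by
        intro y hy hne
        have h := pv_foldl_establish (fun y s' => y = x ∨ Linked s' x y)
          (fun s' z => by
            by_cases hzx : z = x
            · exact Or.inl hzx
            · exact Or.inr (pv_linked_est (fun h => hzx h.symm)))
          (fun s' z w hq => hq.imp id (pv_linked_pres _ _))
          (PySem.List.dedup L) s y hy
        exact h.resolve_left hne)
      (fun s x z h => by
        intro y hy hne
        exact pv_foldl_inv (fun s' => Linked s' x y)
          (fun s' w hl => pv_linked_pres _ _ hl) _ s (h y hy hne))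
      (fun s x hs h => by
        apply pv_foldl_id
        intro y hy
        by_cases hyx : y = x
        · rw [hyx]; exact pv_buildPair_self s x
        · exact pv_linked_triv hs (h y hy hyx))
      L d hnd
  obtain ⟨u0, hh⟩ : ∃ u0, (PySem.List.dedup L).head? = some u0 := by
    cases hU0 : PySem.List.dedup L with
    | nil => rw [hU0] at h2; simp at h2
    | cons a t => exact ⟨a, rfl⟩
  have hstep3 : (PySem.List.dedup L).foldl
      (fun s x => (PySem.List.dedup L).foldl (fun s' y => buildPair s' x y) s) d
      = hqForm (PySem.List.dedup L) (PySem.List.dedup L) d := by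
    rw [pv_foldl_head hh d]
    show (PySem.List.dedup L).tail.foldl
        (fun s x => (PySem.List.dedup L).foldl (fun s' y => buildPair s' x y) s)
        ((PySem.List.dedup L).foldl (fun s' y => buildPair s' u0 y) d) = _
    rw [pv_lem_first hU h2 hh d hnd]
    apply pv_lem_outer hU d hnd
    · simp
    · cases hU0 : PySem.List.dedup L with
      | nil => rw [hU0] at h2; simp at h2
      | cons a t =>
        have : a = u0 := by rw [hU0] at hh; simpa using hh
        rw [this]
        rfl
  rw [hstep1, hstep2, hstep3]


-- ---- gather lemmas (B side) ----

theorem pv_contains_gather (gs : List (List String)) (u : String) :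
    (gather gs).contains u
      = PySem.Set.contains (PySem.List.dedup gs.flatten) u := by
  unfold gather
  rw [PySem.Dict.contains_mk, List.any_map]
  show (PySem.List.dedup gs.flatten).any (fun k => k == u) = _
  rw [PySem.Set.contains_eq_decide]
  rw [Bool.eq_iff_iff, List.any_eq_true, decide_eq_true_eq]
  constructor
  · rintro ⟨x, hx, he⟩
    have : x = u := by simpa using he
    exact this ▸ hx
  · intro h
    exact ⟨u, h, by simp⟩

theorem pv_altNbrs_snoc (gs : List (List String)) (U : List String) (k : String) :
    altNbrs (gs ++ [U]) k = gM U U k (altNbrs gs k) := by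
  unfold altNbrs gM
  rw [List.filter_append, List.flatMap_append, PySem.Set.ofList_append]
  by_cases hk : k ∈ U
  · have h1 : [U].filter (fun g => g.contains k) = [U] := by
      simp [List.contains_eq_mem, hk]
    rw [h1, if_pos hk]
    simp
  · have h1 : [U].filter (fun g => g.contains k) = [] := by
      simp [List.contains_eq_mem, hk]
    rw [h1, if_neg hk]
    simp [PySem.Set.update_nil]

theorem pv_altNbrs_new (gs : List (List String)) (U : List String) {u : String}
    (huU : u ∈ U) (hnew : u ∉ gs.flatten) :
    altNbrs (gs ++ [U]) u = PySem.Set.ofList (U.filter (fun a => a ≠ u)) := by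
  unfold altNbrs
  have h0 : gs.filter (fun g => g.contains u) = [] := by
    rw [List.filter_eq_nil_iff]
    intro g hg
    simp only [List.contains_eq_mem, decide_eq_true_eq]
    intro hu
    exact hnew (List.mem_flatten.mpr ⟨g, hg, hu⟩)
  have h1 : [U].filter (fun g => g.contains u) = [U] := by
    simp [List.contains_eq_mem, huU]
  rw [List.filter_append, h0, h1]
  simp

theorem pv_gather_keys_snoc {gs : List (List String)} {U : List String} (hU : U.Nodup) :
    PySem.List.dedup (gs ++ [U]).flatten
      = PySem.List.dedup gs.flatten
        ++ U.filter (fun y => !(PySem.Set.contains (PySem.List.dedup gs.flatten) y)) := by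
  have h1 : (gs ++ [U]).flatten = gs.flatten ++ U := by
    rw [List.flatten_append]; simp
  have h2 : PySem.Set.ofList U = U := PySem.Set.ofList_eq_self_of_nodup U hU
  rw [h1]
  simp only [PySem.List.dedup_eq_ofList]
  rw [PySem.Set.ofList_append, PySem.Set.update_eq_append_filter, h2]

theorem pv_gather_snoc {gs : List (List String)} {U : List String} (hU : U.Nodup) :
    gForm U U (gather gs) = gather (gs ++ [U]) := by
  unfold gForm nf
  show PySem.Dict.mk _ = PySem.Dict.mk _
  apply congrArg
  have hitems : (gather gs).items
      = (PySem.List.dedup gs.flatten).map (fun k => (k, altNbrs gs k)) := rfl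
  rw [hitems, List.map_map]
  rw [pv_gather_keys_snoc hU, List.map_append]
  have hfeq : U.filter (fun u => !((gather gs).contains u))
      = U.filter (fun y => !(PySem.Set.contains (PySem.List.dedup gs.flatten) y)) := by
    apply List.filter_congr
    intro u _
    rw [pv_contains_gather]
  congr 1
  · apply List.map_congr_left
    intro k _
    show (k, gM U U k (altNbrs gs k)) = (k, altNbrs (gs ++ [U]) k)
    rw [pv_altNbrs_snoc]
  · rw [hfeq]
    apply List.map_congr_left
    intro u hu
    obtain ⟨huU, hnc⟩ := List.mem_filter.mp hu
    have hnew : u ∉ gs.flatten := by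
      intro hmem
      have hmem2 : u ∈ PySem.List.dedup gs.flatten := (PySem.List.mem_dedup _ _).mpr hmem
      have hct : PySem.Set.contains (PySem.List.dedup gs.flatten) u = true := by
        rw [PySem.Set.contains_eq_decide]; exact decide_eq_true hmem2
      rw [hct] at hnc
      simp at hnc
    rw [pv_altNbrs_new gs U huU hnew]

theorem pv_gather_nil : gather [] = PySem.Dict.empty := by
  apply PySem.Dict.ext
  rfl

theorem pv_foldl_gather (gs : List (List String)) (hnd : ∀ U ∈ gs, U.Nodup) :
    gs.foldl (fun d U => gForm U U d) PySem.Dict.empty = gather gs := by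
  induction gs using List.reverseRecOn with
  | nil => exact pv_gather_nil.symm
  | append_singleton gs U ih =>
    rw [List.foldl_append, List.foldl_cons, List.foldl_nil]
    rw [ih (fun V hV => hnd V (List.mem_append_left _ hV))]
    exact pv_gather_snoc (hnd U (List.mem_append_right _ (by simp)))

theorem pv_keysND_gForm {U : List String} (hU : U.Nodup) (d : Adj) (hnd : KeysND d) :
    KeysND (gForm U U d) := pv_keysND_nf hnd hU

theorem pv_foldl_to_groups :
    ∀ (values : List (List String)) (d : Adj), KeysND d →
      values.foldl buildArticle d = (qualGroups values).foldl (fun d U => gForm U U d) d := by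
  intro values
  induction values with
  | nil => intro d _; rfl
  | cons L rest ih =>
    intro d hnd
    rw [List.foldl_cons]
    by_cases h2 : 1 < (PySem.List.dedup L).length
    · have hA : buildArticle d L = gForm (PySem.List.dedup L) (PySem.List.dedup L) d := by
        rw [pv_A_big h2 d hnd, pv_glue]
      have hq : qualGroups (L :: rest) = PySem.List.dedup L :: qualGroups rest := by
        unfold qualGroups
        rw [List.filter_cons, if_pos (by simpa using h2)]
        rfl
      rw [hA, hq, List.foldl_cons]
      exact ih _ (pv_keysND_gForm (PySem.List.nodup_dedup L) d hnd)
    · have hle : (PySem.List.dedup L).length ≤ 1 := by omega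
      have hq : qualGroups (L :: rest) = qualGroups rest := by
        unfold qualGroups
        rw [List.filter_cons, if_neg (by simpa using h2)]
      rw [pv_A_small hle d, hq]
      exact ih d hnd

theorem pv_any_beq (A : List String) (x : String) :
    A.any (fun k => k == x) = decide (x ∈ A) := by
  rw [Bool.eq_iff_iff, List.any_eq_true, decide_eq_true_eq]
  constructor
  · rintro ⟨y, hy, he⟩
    exact (by simpa using he : y = x) ▸ hy
  · intro h; exact ⟨x, h, by simp⟩

theorem pv_contains_two {ν : Type} (A B : List String) (w z : String → ν) (x : String) :
    (PySem.Dict.mk (A.map (fun k => (k, w k)) ++ B.map (fun a => (a, z a)))).contains x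
      = (decide (x ∈ A) || decide (x ∈ B)) := by
  rw [PySem.Dict.contains_mk, List.any_append, List.any_map, List.any_map]
  show (A.any (fun k => k == x) || B.any (fun k => k == x)) = _
  rw [pv_any_beq, pv_any_beq]

theorem pv_keysND_two {ν : Type} (A B : List String) (w z : String → ν)
    (hA : A.Nodup) (hB : B.Nodup) (hd : ∀ b ∈ B, b ∉ A) :
    (PySem.Dict.mk (A.map (fun k => (k, w k)) ++ B.map (fun a => (a, z a)))).keys.Nodup := by
  rw [PySem.Dict.keys_mk, List.map_append, List.map_map, List.map_map]
  have e1 : A.map ((fun (p : String × ν) => p.1) ∘ (fun k => (k, w k))) = A := by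
    rw [show ((fun (p : String × ν) => p.1) ∘ (fun (k : String) => (k, w k))) = id from rfl,
      List.map_id]
  have e2 : B.map ((fun (p : String × ν) => p.1) ∘ (fun a => (a, z a))) = B := by
    rw [show ((fun (p : String × ν) => p.1) ∘ (fun (a : String) => (a, z a))) = id from rfl,
      List.map_id]
  rw [e1, e2, List.nodup_append]
  exact ⟨hA, hB, fun a ha b hb he => hd b hb (he ▸ ha)⟩

-- the inverted index B builds: author -> its groups, in first-occurrence key order
def mVal (gs : List (List String)) (k : String) : List (List String) :=
  gs.filter (fun g => g.contains k)
def mGather (gs : List (List String)) : MDict :=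
  PySem.Dict.mk ((PySem.List.dedup gs.flatten).map (fun k => (k, mVal gs k)))

-- state of the index after group U's authors P (a prefix of U) have been registered
def mForm (gs : List (List String)) (U P : List String) : MDict :=
  PySem.Dict.mk
    (((PySem.List.dedup gs.flatten).map
        (fun k => (k, if k ∈ P then mVal gs k ++ [U] else mVal gs k)))
      ++ ((P.filter (fun a => !(PySem.Set.contains (PySem.List.dedup gs.flatten) a))).map
        (fun a => (a, ([U] : List (List String))))))

theorem pv_mForm_nil (gs : List (List String)) (U : List String) :
    mForm gs U [] = mGather gs := by
  unfold mForm mGather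
  apply congrArg
  simp

theorem pv_mForm_step {gs : List (List String)} {U P R : List String} {a : String}
    (hU : U.Nodup) (hsp : P ++ a :: R = U) :
    (mForm gs U P).modify a [] (fun l => l ++ [U]) = mForm gs U (P ++ [a]) := by
  have hPU : (P ++ a :: R).Nodup := hsp ▸ hU
  rw [List.nodup_append] at hPU
  have hP : P.Nodup := hPU.1
  have haP : a ∉ P := fun ha => (hPU.2.2 a ha a (by simp)) rfl
  have hfP : (P.filter (fun x => !(PySem.Set.contains (PySem.List.dedup gs.flatten) x))).Nodup :=
    hP.filter _
  have hit : (mForm gs U P).items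
      = (((PySem.List.dedup gs.flatten).map
          (fun k => (k, if k ∈ P then mVal gs k ++ [U] else mVal gs k)))
        ++ ((P.filter (fun x => !(PySem.Set.contains (PySem.List.dedup gs.flatten) x))).map
          (fun x => (x, ([U] : List (List String)))))) := rfl
  have hit2 : (mForm gs U (P ++ [a])).items
      = (((PySem.List.dedup gs.flatten).map
          (fun k => (k, if k ∈ P ++ [a] then mVal gs k ++ [U] else mVal gs k)))
        ++ (((P ++ [a]).filter
              (fun x => !(PySem.Set.contains (PySem.List.dedup gs.flatten) x))).map
          (fun x => (x, ([U] : List (List String)))))) := rfl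
  show (mForm gs U P).insert a ((mForm gs U P).getD a [] ++ [U]) = _
  by_cases haK : a ∈ PySem.List.dedup gs.flatten
  · have hco : (mForm gs U P).contains a = true := by
      unfold mForm
      rw [pv_contains_two, decide_eq_true haK, Bool.true_or]
    have hnd : (mForm gs U P).keys.Nodup := by
      unfold mForm
      exact pv_keysND_two _ _ _ _ (PySem.List.nodup_dedup _) hfP
        (fun b hb => by
          have := (List.mem_filter.mp hb).2
          rw [PySem.Set.contains_eq_decide] at this
          simpa using this)
    have hmem : (a, mVal gs a) ∈ (mForm gs U P).items := by
      rw [hit]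
      apply List.mem_append_left
      exact List.mem_map.mpr ⟨a, haK, by rw [if_neg haP]⟩
    have hval : (mForm gs U P).getD a [] = mVal gs a :=
      PySem.Dict.getD_of_mem_items _ hmem hnd _
    rw [hval]
    apply PySem.Dict.ext
    rw [PySem.Dict.items_insert_of_contains _ _ hco, hit, hit2, List.map_append,
      List.map_map, List.map_map]
    have hfa : (P ++ [a]).filter
        (fun x => !(PySem.Set.contains (PySem.List.dedup gs.flatten) x))
        = P.filter (fun x => !(PySem.Set.contains (PySem.List.dedup gs.flatten) x)) := by
      have hca : PySem.Set.contains (PySem.List.dedup gs.flatten) a = true := by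
        rw [PySem.Set.contains_eq_decide]; exact decide_eq_true haK
      rw [List.filter_append, List.filter_singleton, hca]
      simp
    rw [hfa]
    congr 1
    · apply List.map_congr_left
      intro k _
      show (if ((k, if k ∈ P then mVal gs k ++ [U] else mVal gs k).1 == a) = true
          then (a, mVal gs a ++ [U]) else (k, if k ∈ P then mVal gs k ++ [U] else mVal gs k))
        = (k, if k ∈ P ++ [a] then mVal gs k ++ [U] else mVal gs k)
      by_cases hka : k = a
      · subst hka
        rw [if_pos (by simp), if_pos (by simp)]
      · rw [if_neg (by simpa using hka)]
        have hiff : (k ∈ P ++ [a]) ↔ k ∈ P := by simp [hka]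
        by_cases hkP : k ∈ P
        · rw [if_pos hkP, if_pos (hiff.mpr hkP)]
        · rw [if_neg hkP, if_neg (fun h => hkP (hiff.mp h))]
    · apply List.map_congr_left
      intro b hb
      have hbP : b ∈ P := (List.mem_filter.mp hb).1
      have hba : b ≠ a := fun h => haP (h ▸ hbP)
      show (if ((b, ([U] : List (List String))).1 == a) = true
          then (a, mVal gs a ++ [U]) else (b, ([U] : List (List String))))
        = (b, ([U] : List (List String)))
      rw [if_neg (by simpa using hba)]
  · have hco : (mForm gs U P).contains a = false := by
      unfold mForm
      rw [pv_contains_two]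
      have h2 : a ∉ P.filter (fun x => !(PySem.Set.contains (PySem.List.dedup gs.flatten) x)) :=
        fun h => haP (List.mem_filter.mp h).1
      rw [decide_eq_false haK, decide_eq_false h2, Bool.false_or]
    have hval : (mForm gs U P).getD a [] = [] :=
      PySem.Dict.getD_of_not_contains _ _ hco
    rw [hval]
    apply PySem.Dict.ext
    rw [PySem.Dict.items_insert_of_not_contains _ _ hco, hit, hit2]
    have hfa : (P ++ [a]).filter
        (fun x => !(PySem.Set.contains (PySem.List.dedup gs.flatten) x))
        = P.filter (fun x => !(PySem.Set.contains (PySem.List.dedup gs.flatten) x)) ++ [a] := by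
      have hca : PySem.Set.contains (PySem.List.dedup gs.flatten) a = false := by
        rw [PySem.Set.contains_eq_decide]; exact decide_eq_false haK
      rw [List.filter_append, List.filter_singleton, hca]
      simp
    rw [hfa, List.map_append]
    have hmap : (PySem.List.dedup gs.flatten).map
        (fun k => (k, if k ∈ P ++ [a] then mVal gs k ++ [U] else mVal gs k))
        = (PySem.List.dedup gs.flatten).map
        (fun k => (k, if k ∈ P then mVal gs k ++ [U] else mVal gs k)) := by
      apply List.map_congr_left
      intro k hk
      have hka : k ≠ a := fun h => haK (h ▸ hk)
      have hiff : (k ∈ P ++ [a]) ↔ k ∈ P := by simp [hka]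
      by_cases hkP : k ∈ P
      · rw [if_pos hkP, if_pos (hiff.mpr hkP)]
      · rw [if_neg (fun h => hkP (hiff.mp h)), if_neg hkP]
    rw [hmap]
    simp [List.append_assoc]

theorem pv_mForm_full {gs : List (List String)} {U : List String} (hU : U.Nodup) :
    mForm gs U U = mGather (gs ++ [U]) := by
  unfold mForm mGather
  apply congrArg
  rw [pv_gather_keys_snoc hU, List.map_append]
  congr 1
  · apply List.map_congr_left
    intro k _
    have hsplit : mVal (gs ++ [U]) k = mVal gs k ++ [U].filter (fun g => g.contains k) := by
      unfold mVal
      rw [List.filter_append]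
    by_cases hkU : k ∈ U
    · have : [U].filter (fun g => g.contains k) = [U] := by
        simp [List.contains_eq_mem, hkU]
      rw [if_pos hkU, hsplit, this]
    · have : [U].filter (fun g => g.contains k) = [] := by
        simp [List.contains_eq_mem, hkU]
      rw [if_neg hkU, hsplit, this, List.append_nil]
  · apply List.map_congr_left
    intro u hu
    obtain ⟨huU, hnc⟩ := List.mem_filter.mp hu
    have hnew : u ∉ gs.flatten := by
      intro hmem
      have hmem2 : u ∈ PySem.List.dedup gs.flatten := (PySem.List.mem_dedup _ _).mpr hmem
      have hct : PySem.Set.contains (PySem.List.dedup gs.flatten) u = true := by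
        rw [PySem.Set.contains_eq_decide]; exact decide_eq_true hmem2
      rw [hct] at hnc
      simp at hnc
    have h0 : gs.filter (fun g => g.contains u) = [] := by
      rw [List.filter_eq_nil_iff]
      intro g hg
      simp only [List.contains_eq_mem, decide_eq_true_eq]
      intro hu2
      exact hnew (List.mem_flatten.mpr ⟨g, hg, hu2⟩)
    have h1 : [U].filter (fun g => g.contains u) = [U] := by
      simp [List.contains_eq_mem, huU]
    unfold mVal
    rw [List.filter_append, h0, h1]
    rfl

theorem pv_mStep_fold {gs : List (List String)} {U : List String} (hU : U.Nodup) :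
    U.foldl (fun d a => d.modify a [] (fun l => l ++ [U])) (mGather gs)
      = mGather (gs ++ [U]) := by
  have main : ∀ (R P : List String), P ++ R = U →
      R.foldl (fun d a => d.modify a [] (fun l => l ++ [U])) (mForm gs U P) = mForm gs U U := by
    intro R
    induction R with
    | nil =>
      intro P h
      rw [List.append_nil] at h
      rw [h, List.foldl_nil]
    | cons a R' ih =>
      intro P h
      rw [List.foldl_cons, pv_mForm_step hU h]
      exact ih (P ++ [a]) (by rw [List.append_assoc]; exact h)
  have h0 := main U [] (by simp)
  rw [pv_mForm_nil] at h0
  rw [h0]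
  exact pv_mForm_full hU

theorem pv_mGather_nil : mGather [] = PySem.Dict.empty := by
  apply PySem.Dict.ext
  rfl

theorem pv_foldl_mGather (gs : List (List String)) (hnd : ∀ U ∈ gs, U.Nodup) :
    gs.foldl (fun d U => U.foldl (fun d a => d.modify a [] (fun l => l ++ [U])) d)
        PySem.Dict.empty
      = mGather gs := by
  induction gs using List.reverseRecOn with
  | nil => exact pv_mGather_nil.symm
  | append_singleton gs U ih =>
    rw [List.foldl_append, List.foldl_cons, List.foldl_nil]
    rw [ih (fun V hV => hnd V (List.mem_append_left _ hV))]
    exact pv_mStep_fold (hnd U (List.mem_append_right _ (by simp)))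

theorem pv_mem_to_groups :
    ∀ (values : List (List String)) (d : MDict),
      values.foldl memArticle d
        = (qualGroups values).foldl
            (fun d U => U.foldl (fun d a => d.modify a [] (fun l => l ++ [U])) d) d := by
  intro values
  induction values with
  | nil => intro d; rfl
  | cons L rest ih =>
    intro d
    rw [List.foldl_cons]
    by_cases h2 : 1 < (PySem.List.dedup L).length
    · have hA : memArticle d L
          = (PySem.List.dedup L).foldl
              (fun d a => d.modify a [] (fun l => l ++ [PySem.List.dedup L])) d := by
        show (if 1 < (PySem.List.dedup L).length then _ else d) = _
        rw [if_pos h2]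
      have hq : qualGroups (L :: rest) = PySem.List.dedup L :: qualGroups rest := by
        unfold qualGroups
        rw [List.filter_cons, if_pos (by simpa using h2)]
        rfl
      rw [hA, hq, List.foldl_cons]
      exact ih _
    · have hA : memArticle d L = d := by
        show (if 1 < (PySem.List.dedup L).length then _ else d) = _
        rw [if_neg h2]
      have hq : qualGroups (L :: rest) = qualGroups rest := by
        unfold qualGroups
        rw [List.filter_cons, if_neg (by simpa using h2)]
      rw [hA, hq]
      exact ih d

-- ===== VERDICT (by name: the statement is the Claim_ definition above) =====
theorem build_spec : Claim_equal_build := by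
  intro artigos _
  unfold Spec_build build build_alt
  have hnd : ∀ U ∈ qualGroups ((PySem.Dict.ofList artigos).values), U.Nodup := by
    intro U hU
    obtain ⟨L, _, rfl⟩ := List.mem_map.mp hU
    exact PySem.List.nodup_dedup L
  have h1 := pv_foldl_to_groups ((PySem.Dict.ofList artigos).values) PySem.Dict.empty
    (by simp [KeysND])
  rw [h1, pv_foldl_gather _ hnd, pv_mem_to_groups, pv_foldl_mGather _ hnd]
  show (gather _).items = ((mGather _).items).map _
  rw [show (mGather (qualGroups ((PySem.Dict.ofList artigos).values))).items
      = (PySem.List.dedup (qualGroups ((PySem.Dict.ofList artigos).values)).flatten).map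
          (fun k => (k, mVal (qualGroups ((PySem.Dict.ofList artigos).values)) k)) from rfl,
    List.map_map]
  rfl
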